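-- pv_equiv track=rewrite | github.com/LukJA/fric | hdl/test_ffno.py | first_ones
-- ===== SOURCE A (Python) =====
-- def first_ones(s: str, n: int = 2):
--     i = 0
--     p = ""
--     for q in range(0, len(s)):
--         if s[q] == "1":
--             i += 1
--         if i <= n:
--             p += s[q]
--         else:
--             p += "0"
--     return p
-- ===== SOURCE B (Python) =====
-- def first_ones(s: str, n: int = 2):
--     # find the cutoff index j: first position whose inclusive running count of '1's exceeds n
--     cnt = 0
--     j = len(s)
--     for k, ch in enumerate(s):
--         if ch == "1":
--             cnt += 1
--         if cnt > n:
--             j = k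
--             break
--     return s[:j] + "0" * (len(s) - j)
-- ===== Notes on version B (the rewrite author's own statement) =====
-- stated objective: simpler
-- what changed: B replaces A's per-character two-branch output building with computing a single cutoff index (first position where the running count of '1's exceeds n) and returning the kept prefix slice plus a zero pad.
import Mathlib
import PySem

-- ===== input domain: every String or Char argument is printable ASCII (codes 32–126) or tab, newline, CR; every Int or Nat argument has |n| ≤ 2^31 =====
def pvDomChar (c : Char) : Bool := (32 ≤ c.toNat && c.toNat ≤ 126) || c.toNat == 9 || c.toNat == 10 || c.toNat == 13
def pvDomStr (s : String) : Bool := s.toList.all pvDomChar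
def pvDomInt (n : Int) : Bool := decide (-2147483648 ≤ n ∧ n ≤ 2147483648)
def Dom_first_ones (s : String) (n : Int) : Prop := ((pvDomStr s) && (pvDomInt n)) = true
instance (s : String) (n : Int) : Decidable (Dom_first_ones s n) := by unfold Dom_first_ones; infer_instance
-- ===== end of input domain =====

-- B computes the cutoff index (first position whose running '1'-count exceeds n) and returns prefix-slice + zero pad, instead of A's per-character two-branch append; objective: simpler.


-- ===== PORT A =====
-- A's for-loop over the characters with state (i, p): count ones, append s[q] or '0'.
def firstOnesLoop (n : Int) (i : Int) : List Char → List Char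
  | [] => []
  | c :: cs =>
    let i' := if c = '1' then i + 1 else i
    (if i' ≤ n then c else '0') :: firstOnesLoop n i' cs

def first_ones (s : String) (n : Int) : String :=
  String.ofList (firstOnesLoop n 0 s.toList)

-- ===== PORT B =====
-- B's scan for the cutoff index j (first position whose inclusive running '1'-count exceeds n).
def cutIdx (n : Int) (cnt : Int) : List Char → Nat
  | [] => 0
  | c :: cs =>
    let cnt' := if c = '1' then cnt + 1 else cnt
    if cnt' > n then 0 else 1 + cutIdx n cnt' cs

def first_ones_alt (s : String) (n : Int) : String :=
  let l := s.toList
  let j := cutIdx n 0 l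
  String.ofList (l.take j ++ List.replicate (l.length - j) '0')

-- ===== PRECONDITION & SPEC =====
def Spec_first_ones (s : String) (n : Int) (out : String) : Prop := out = first_ones_alt s n
instance (s : String) (n : Int) (out : String) : Decidable (Spec_first_ones s n out) := by unfold Spec_first_ones; infer_instance

-- ===== CLAIM (what is proved, stated in full; the proofs are below) =====
def Claim_equal_first_ones : Prop := ∀ (s : String) (n : Int), Dom_first_ones s n → Spec_first_ones s n (first_ones s n)

-- ===== LEMMAS AND PROOFS =====
theorem firstOnesLoop_gt (n : Int) (i : Int) (l : List Char) (h : i > n) :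
    firstOnesLoop n i l = List.replicate l.length '0' := by
  induction l generalizing i with
  | nil => simp [firstOnesLoop]
  | cons c cs ih =>
    simp only [firstOnesLoop, List.length_cons, List.replicate_succ]
    have hi' : (if c = '1' then i + 1 else i) > n := by split <;> omega
    rw [if_neg (by omega), ih _ hi']

theorem firstOnesLoop_eq_cut (n : Int) (i : Int) (l : List Char) :
    firstOnesLoop n i l =
      l.take (cutIdx n i l) ++ List.replicate (l.length - cutIdx n i l) '0' := by
  induction l generalizing i with
  | nil => simp [firstOnesLoop, cutIdx]
  | cons c cs ih =>
    simp only [firstOnesLoop, cutIdx]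
    by_cases h : (if c = '1' then i + 1 else i) > n
    · rw [if_pos h, if_neg (by omega)]
      simp [firstOnesLoop_gt n _ cs h, List.replicate_succ]
    · rw [if_neg h, if_pos (by omega)]
      have h1 : 1 + cutIdx n (if c = '1' then i + 1 else i) cs
          = cutIdx n (if c = '1' then i + 1 else i) cs + 1 := by omega
      rw [h1, List.take_succ_cons, List.length_cons]
      have h2 : cs.length + 1 - (cutIdx n (if c = '1' then i + 1 else i) cs + 1)
          = cs.length - cutIdx n (if c = '1' then i + 1 else i) cs := by omega
      rw [h2, List.cons_append]
      exact congrArg _ (ih (if c = '1' then i + 1 else i))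

-- ===== VERDICT (by name: the statement is the Claim_ definition above) =====
theorem first_ones_spec : Claim_equal_first_ones := by
  intro s n _
  unfold Spec_first_ones first_ones first_ones_alt
  rw [firstOnesLoop_eq_cut]
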